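-- pv_equiv track=rewrite | github.com/mn-taylor/icy-moons-toolbox | utilities.py | string_to_tuples
-- ===== SOURCE A (Python) =====
-- def string_to_tuples(string):
--     num = ""
--     string_nums = []
--     for char in string:
--         try:
--             int(char)
--             num += char
--         except:
--             if num:
--                 string_nums.append(num)
--             num = ""
--     if num != "":
--         string_nums.append(num)
--     result = []
--     for i in range(len(string_nums) // 2):
--         result.append((int(string_nums[2 * i]), int(string_nums[2 * i + 1])))
--     return result
-- ===== SOURCE B (Python) =====
-- import re
--
--
-- def string_to_tuples(string):
--     runs = re.findall(r"\d+", string)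
--     it = iter(runs)
--     return [(int(a), int(b)) for a, b in zip(it, it)]
-- ===== Notes on version B (the rewrite author's own statement) =====
-- stated objective: idiomatic
-- what changed: Replaces the try/except per-character state machine and index loop over range(len//2) with a regex extraction of digit runs (re.findall(r'\d+')) followed by adjacent pairing via zip over one iterator.
import Mathlib
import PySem

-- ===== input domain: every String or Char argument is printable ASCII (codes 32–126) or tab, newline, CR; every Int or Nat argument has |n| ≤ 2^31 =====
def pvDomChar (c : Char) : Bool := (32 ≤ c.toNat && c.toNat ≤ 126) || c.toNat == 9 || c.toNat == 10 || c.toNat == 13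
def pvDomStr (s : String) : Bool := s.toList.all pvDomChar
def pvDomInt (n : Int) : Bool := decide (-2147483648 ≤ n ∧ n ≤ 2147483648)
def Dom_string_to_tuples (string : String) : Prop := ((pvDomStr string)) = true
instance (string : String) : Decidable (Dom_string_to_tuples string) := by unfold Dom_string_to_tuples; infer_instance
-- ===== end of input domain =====

-- B replaces A's try/except character state machine by a regex-style digit-run
-- extraction followed by adjacent pairing (objective: idiomatic; same cost).

-- ===== PORT A =====
-- int(c) on a single char succeeds exactly when c is a digit (exact on the ASCII domain);
-- num is kept as List Char; int() of a collected digit run is PySem.Int.ofStr? (always a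
-- valid int literal here, so .getD 0 returns exactly Python's value).
def pvConv (cs : List Char) : Int := (PySem.Int.ofStr? (String.ofList cs)).getD 0

-- the body of A's first for-loop (try: int(char); num += char / except: flush)
def pvStepA (st : List Char × List (List Char)) (char : Char) : List Char × List (List Char) :=
  if PySem.Chars.isdigit char then (st.1 ++ [char], st.2)
  else if st.1 ≠ [] then ([], st.2 ++ [st.1]) else ([], st.2)

-- A's final 'if num != "": string_nums.append(num)'
def pvFlush (st : List Char × List (List Char)) : List (List Char) :=
  if st.1 ≠ [] then st.2 ++ [st.1] else st.2

def string_to_tuples (string : String) : List (Int × Int) :=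
  let string_nums := pvFlush (string.toList.foldl pvStepA ([], []))
  (List.range (string_nums.length / 2)).map
    (fun i => (pvConv (string_nums.getD (2 * i) []),
               pvConv (string_nums.getD (2 * i + 1) [])))

-- ===== PORT B =====
-- re.findall(r"\d+", string): the maximal digit runs, left to right (exact on ASCII)
def pvDigitRuns : List Char → List (List Char)
  | [] => []
  | c :: cs =>
    if PySem.Chars.isdigit c then
      (c :: cs.takeWhile PySem.Chars.isdigit) :: pvDigitRuns (cs.dropWhile PySem.Chars.isdigit)
    else pvDigitRuns cs
termination_by l => l.length
decreasing_by
  · exact Nat.lt_succ_of_le (List.length_dropWhile_le PySem.Chars.isdigit cs)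
  · simp

-- zip(it, it) over one iterator: consume adjacent pairs, drop an unpaired tail
def pvPairUp : List (List Char) → List (Int × Int)
  | a :: b :: rest => (pvConv a, pvConv b) :: pvPairUp rest
  | [_] => []
  | [] => []

def string_to_tuples_alt (string : String) : List (Int × Int) :=
  pvPairUp (pvDigitRuns string.toList)

-- ===== PRECONDITION & SPEC =====
def Spec_string_to_tuples (string : String) (out : List (Int × Int)) : Prop := out = string_to_tuples_alt string
instance (string : String) (out : List (Int × Int)) : Decidable (Spec_string_to_tuples string out) := by unfold Spec_string_to_tuples; infer_instance

-- ===== CLAIM (what is proved, stated in full; the proofs are below) =====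
def Claim_equal_string_to_tuples : Prop := ∀ (string : String), Dom_string_to_tuples string → Spec_string_to_tuples string (string_to_tuples string)

-- ===== LEMMAS AND PROOFS =====

-- A's loop, from any pending run num and accumulator acc, followed by the final flush,
-- produces acc ++ the maximal digit runs (the pending num extending the first run).
lemma pvFold_eq_runs (l : List Char) : ∀ (num : List Char) (acc : List (List Char)),
    pvFlush (l.foldl pvStepA (num, acc))
    = acc ++ (if num = [] then pvDigitRuns l
              else (num ++ l.takeWhile PySem.Chars.isdigit)
                     :: pvDigitRuns (l.dropWhile PySem.Chars.isdigit)) := by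
  induction l with
  | nil =>
    intro num acc
    by_cases h : num = [] <;> simp [pvFlush, h, pvDigitRuns]
  | cons c cs ih =>
    intro num acc
    by_cases hd : PySem.Chars.isdigit c
    · have hstep : pvStepA (num, acc) c = (num ++ [c], acc) := by simp [pvStepA, hd]
      have hne : num ++ [c] ≠ [] := by simp
      rw [List.foldl_cons, hstep, ih]
      by_cases h : num = [] <;>
        simp [h, hne, pvDigitRuns, hd]
    · by_cases h : num = []
      · have hstep : pvStepA (num, acc) c = ([], acc) := by simp [pvStepA, hd, h]
        rw [List.foldl_cons, hstep, ih]
        simp [h, pvDigitRuns, hd]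
      · have hstep : pvStepA (num, acc) c = ([], acc ++ [num]) := by simp [pvStepA, hd, h]
        rw [List.foldl_cons, hstep, ih]
        simp [h, pvDigitRuns, hd]

-- adjacent pairing = A's index loop over range(len // 2)
lemma pvPairUp_eq_range (rs : List (List Char)) :
    pvPairUp rs = (List.range (rs.length / 2)).map
      (fun i => (pvConv (rs.getD (2 * i) []), pvConv (rs.getD (2 * i + 1) []))) := by
  induction rs using pvPairUp.induct with
  | case1 a b rest ih =>
    have hlen : (a :: b :: rest).length / 2 = rest.length / 2 + 1 := by
      simp [List.length_cons]; omega
    rw [pvPairUp, hlen, List.range_succ_eq_map, List.map_cons, List.map_map, ih]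
    congr 1
  | case2 a => simp [pvPairUp]
  | case3 => simp [pvPairUp]

-- ===== VERDICT (by name: the statement is the Claim_ definition above) =====
theorem string_to_tuples_spec : Claim_equal_string_to_tuples := by
  intro s _
  unfold Spec_string_to_tuples string_to_tuples string_to_tuples_alt
  have h := pvFold_eq_runs s.toList [] []
  simp at h
  simp [h, pvPairUp_eq_range]
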